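-- pv_equiv track=rewrite | github.com/SharmaSimm/Restaurant-Menu | Program 3_1.py | find_nuggets_combination
-- ===== SOURCE A (Python) =====
-- def find_nuggets_combination(n):
--     total_nuggets = [] #to store the possible combination
--     for a in range(n//6 + 1): #Iterate over possible 6-piece boxes
--         for b in range(n//9 +1): #Iterate over possible 9 pieces boxes
--             for c in range(n//22 + 1): #Iterate over possible 22 pieces boxes
--               #Checks if the current combination of boxes equals the desired quantity
--                 if 6 * a + 9*b + 22*c == n:
--                     total_nuggets.append(f" Six_piece:  {a},  Nine piece: {b}  , Twenty-two piece : {c} " ) #if it does add the combination to list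
--
--     return total_nuggets
-- ===== SOURCE B (Python) =====
-- def find_nuggets_combination(n):
--     # Comprehension: bound b by the remaining nuggets after a; c is computed, not searched.
--     return [
--         f" Six_piece:  {a},  Nine piece: {b}  , Twenty-two piece : {(n - 6*a - 9*b) // 22} "
--         for a in range(n//6 + 1)
--         for b in range((n - 6*a)//9 + 1)
--         if (n - 6*a - 9*b) % 22 == 0
--     ]
-- ===== Notes on version B (the rewrite author's own statement) =====
-- stated objective: faster
-- what changed: A's triple nested search loop is replaced by a flat comprehension over the two small box counts only: the inner range is bounded by the nuggets remaining after the six-piece boxes, and the large-box count is computed directly from the remainder's divisibility instead of being searched for.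
import Mathlib
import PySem

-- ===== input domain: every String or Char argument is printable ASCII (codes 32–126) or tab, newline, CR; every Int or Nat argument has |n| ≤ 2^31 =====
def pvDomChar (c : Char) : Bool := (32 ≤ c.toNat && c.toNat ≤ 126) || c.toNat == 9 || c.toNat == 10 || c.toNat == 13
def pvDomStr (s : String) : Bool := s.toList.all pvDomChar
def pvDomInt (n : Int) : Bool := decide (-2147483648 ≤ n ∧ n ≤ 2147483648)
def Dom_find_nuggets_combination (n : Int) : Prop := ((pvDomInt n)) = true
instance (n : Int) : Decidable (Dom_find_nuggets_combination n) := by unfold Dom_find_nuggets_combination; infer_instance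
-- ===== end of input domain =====

-- B replaces A's triple nested search by a flat comprehension over (a,b) with c computed
-- from the remainder's divisibility by 22 (measured faster, asymptotic).

-- the f-string both Pythons build (identical literal in A and B)
def pvFmt (a b c : Int) : String :=
  " Six_piece:  " ++ PySem.Int.toStr a ++ ",  Nine piece: " ++ PySem.Int.toStr b ++
    "  , Twenty-two piece : " ++ PySem.Int.toStr c ++ " "

-- ===== PORT A =====
def find_nuggets_combination (n : Int) : List String :=
  (PySem.List.pyRange 0 (PySem.Int.floordiv n 6 + 1) 1).foldl (fun acc a =>
    (PySem.List.pyRange 0 (PySem.Int.floordiv n 9 + 1) 1).foldl (fun acc b =>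
      (PySem.List.pyRange 0 (PySem.Int.floordiv n 22 + 1) 1).foldl (fun acc c =>
        if 6 * a + 9 * b + 22 * c = n then acc ++ [pvFmt a b c] else acc) acc) acc) []

-- ===== PORT B =====
def find_nuggets_combination_alt (n : Int) : List String :=
  (PySem.List.pyRange 0 (PySem.Int.floordiv n 6 + 1) 1).flatMap (fun a =>
    (PySem.List.pyRange 0 (PySem.Int.floordiv (n - 6 * a) 9 + 1) 1).filterMap (fun b =>
      if PySem.Int.mod (n - 6 * a - 9 * b) 22 = 0 then
        some (pvFmt a b (PySem.Int.floordiv (n - 6 * a - 9 * b) 22))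
      else none))

-- ===== PRECONDITION & SPEC =====
def Spec_find_nuggets_combination (n : Int) (out : List String) : Prop := out = find_nuggets_combination_alt n
instance (n : Int) (out : List String) : Decidable (Spec_find_nuggets_combination n out) := by unfold Spec_find_nuggets_combination; infer_instance

-- ===== CLAIM (what is proved, stated in full; the proofs are below) =====
def Claim_equal_find_nuggets_combination : Prop := ∀ (n : Int), Dom_find_nuggets_combination n → Spec_find_nuggets_combination n (find_nuggets_combination n)

-- ===== LEMMAS AND PROOFS =====

-- at most one c in [0,M) satisfies 22*c = r; the filter is that singleton exactly when 22 | r, 0 <= r, r/22 < M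
lemma pv_filter_range_nat (r : Int) (m : Nat) :
    List.filter (fun c => decide (22 * c = r)) (PySem.List.pyRange 0 (m : Int) 1)
      = if 0 ≤ r ∧ r % 22 = 0 ∧ r / 22 < (m : Int) then [r / 22] else [] := by
  induction m with
  | zero =>
    simp only [Nat.cast_zero]
    rw [PySem.List.pyRange_one_eq_nil le_rfl, if_neg (by omega)]
    simp
  | succ k ih =>
    have hcast : ((k + 1 : Nat) : Int) = (k : Int) + 1 := by push_cast; ring
    rw [hcast, PySem.List.pyRange_one_succ_right (by positivity), List.filter_append, ih]
    by_cases h : 22 * (k : Int) = r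
    · have hd : (decide (22 * (k : Int) = r)) = true := by simpa using h
      simp only [List.filter_cons, List.filter_nil, hd, if_true]
      rw [if_neg (c := 0 ≤ r ∧ r % 22 = 0 ∧ r / 22 < (k : Int)) (by omega),
          if_pos (c := 0 ≤ r ∧ r % 22 = 0 ∧ r / 22 < (k : Int) + 1) (by omega)]
      have hq : r / 22 = (k : Int) := by omega
      simp [hq]
    · have hd : (decide (22 * (k : Int) = r)) = false := by simpa using h
      simp only [List.filter_cons, List.filter_nil, hd, Bool.false_eq_true, if_false,
        List.append_nil]
      by_cases hcond : 0 ≤ r ∧ r % 22 = 0 ∧ r / 22 < (k : Int)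
      · rw [if_pos hcond, if_pos (c := 0 ≤ r ∧ r % 22 = 0 ∧ r / 22 < (k : Int) + 1) (by omega)]
      · rw [if_neg hcond, if_neg (c := 0 ≤ r ∧ r % 22 = 0 ∧ r / 22 < (k : Int) + 1) (by omega)]

lemma pv_filter_range (r M : Int) :
    List.filter (fun c => decide (22 * c = r)) (PySem.List.pyRange 0 M 1)
      = if 0 ≤ r ∧ r % 22 = 0 ∧ r / 22 < M then [r / 22] else [] := by
  by_cases hM : M ≤ 0
  · rw [PySem.List.pyRange_one_eq_nil hM, if_neg (by omega)]
    simp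
  · have hMe : ((M.toNat : Nat) : Int) = M := by omega
    rw [← hMe]
    exact pv_filter_range_nat r M.toNat

-- A's innermost c-loop equals a single conditional append, for a,b >= 0
lemma pv_inner_eq (n a b : Int) (ha : 0 ≤ a) (hb : 0 ≤ b) (acc : List String) :
    List.foldl (fun acc c => if 6 * a + 9 * b + 22 * c = n then acc ++ [pvFmt a b c] else acc)
        acc (PySem.List.pyRange 0 (PySem.Int.floordiv n 22 + 1) 1)
      = (if decide (0 ≤ n - 6 * a - 9 * b ∧ (n - 6 * a - 9 * b) % 22 = 0) = true then
           acc ++ [pvFmt a b ((n - 6 * a - 9 * b) / 22)]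
         else acc) := by
  have hstep : (fun (acc' : List String) (c : Int) =>
        if 6 * a + 9 * b + 22 * c = n then acc' ++ [pvFmt a b c] else acc')
      = (fun acc' c =>
        if (fun c => decide (22 * c = n - 6 * a - 9 * b)) c = true then acc' ++ [pvFmt a b c] else acc') := by
    funext acc' c
    by_cases h : 6 * a + 9 * b + 22 * c = n
    · rw [if_pos h, if_pos (by simp; omega)]
    · rw [if_neg h, if_neg (by simp; omega)]
  rw [hstep,
      PySem.List.foldl_append_if (fun c => decide (22 * c = n - 6 * a - 9 * b)) (pvFmt a b),
      pv_filter_range (n - 6 * a - 9 * b)]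
  set r := n - 6 * a - 9 * b with hr
  have hfd : PySem.Int.floordiv n 22 = n / 22 := PySem.Int.floordiv_eq_ediv_of_pos (by norm_num)
  by_cases h : 0 ≤ r ∧ r % 22 = 0
  · rw [if_pos ⟨h.1, h.2, by rw [hfd]; omega⟩, if_pos (by simpa using h)]
    simp
  · rw [if_neg (by tauto), if_neg (by simpa using h)]
    simp

-- a comprehension-with-if is a filter followed by a map
lemma pv_filterMap_if {α β : Type} (q : α → Prop) [DecidablePred q] (f : α → β) (l : List α) :
    l.filterMap (fun x => if q x then some (f x) else none)
      = (l.filter (fun x => decide (q x))).map f := by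
  induction l with
  | nil => simp
  | cons x xs ih =>
    by_cases h : q x <;> simp [List.filterMap_cons, List.filter_cons, h, ih]

-- B's truncated b-range filters to the same list as A's full b-range:
-- past b = (n-6a)//9 the remainder is negative, below it the 0 ≤ rem test is redundant
lemma pv_filter_b_eq (n a : Int) (ha : 0 ≤ a) (han : 6 * a ≤ n) :
    List.filter (fun b => decide (0 ≤ n - 6 * a - 9 * b ∧ (n - 6 * a - 9 * b) % 22 = 0))
        (PySem.List.pyRange 0 (PySem.Int.floordiv n 9 + 1) 1)
      = List.filter (fun b => decide ((n - 6 * a - 9 * b) % 22 = 0))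
        (PySem.List.pyRange 0 (PySem.Int.floordiv (n - 6 * a) 9 + 1) 1) := by
  have h9 : PySem.Int.floordiv n 9 = n / 9 := PySem.Int.floordiv_eq_ediv_of_pos (by norm_num)
  have h9' : PySem.Int.floordiv (n - 6 * a) 9 = (n - 6 * a) / 9 :=
    PySem.Int.floordiv_eq_ediv_of_pos (by norm_num)
  set s := n - 6 * a with hs
  have hs0 : 0 ≤ s := by omega
  have hdm : 9 * (s / 9) + s % 9 = s := Int.ediv_add_emod s 9
  have hm0 : 0 ≤ s % 9 := Int.emod_nonneg s (by norm_num)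
  have hm9 : s % 9 < 9 := Int.emod_lt_of_pos s (by norm_num)
  have hdm' : 9 * (n / 9) + n % 9 = n := Int.ediv_add_emod n 9
  have hm0' : 0 ≤ n % 9 := Int.emod_nonneg n (by norm_num)
  have hm9' : n % 9 < 9 := Int.emod_lt_of_pos n (by norm_num)
  have hle : s / 9 + 1 ≤ n / 9 + 1 := by omega
  rw [h9, h9',
      PySem.List.pyRange_one_append 0 (s / 9 + 1) (n / 9 + 1) (by omega) hle,
      List.filter_append]
  have htail : List.filter
      (fun b => decide (0 ≤ s - 9 * b ∧ (s - 9 * b) % 22 = 0))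
      (PySem.List.pyRange (s / 9 + 1) (n / 9 + 1) 1) = [] := by
    rw [List.filter_eq_nil_iff]
    intro b hb
    have := (PySem.List.mem_pyRange_one.mp hb).1
    simp only [decide_eq_true_eq, not_and]
    intro hr
    omega
  rw [htail, List.append_nil]
  apply List.filter_congr
  intro b hb
  have hbr := PySem.List.mem_pyRange_one.mp hb
  have : 0 ≤ s - 9 * b := by omega
  simp only [decide_eq_decide]
  tauto

-- one row of A (fixed a, the whole b-loop) equals B's row for that a
lemma pv_row_eq (n a : Int) (ha : 0 ≤ a) (han : 6 * a ≤ n) (acc : List String) :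
    List.foldl (fun acc b =>
        List.foldl (fun acc c => if 6 * a + 9 * b + 22 * c = n then acc ++ [pvFmt a b c] else acc)
          acc (PySem.List.pyRange 0 (PySem.Int.floordiv n 22 + 1) 1))
      acc (PySem.List.pyRange 0 (PySem.Int.floordiv n 9 + 1) 1)
      = acc ++ (PySem.List.pyRange 0 (PySem.Int.floordiv (n - 6 * a) 9 + 1) 1).filterMap (fun b =>
          if PySem.Int.mod (n - 6 * a - 9 * b) 22 = 0 then
            some (pvFmt a b (PySem.Int.floordiv (n - 6 * a - 9 * b) 22))
          else none) := by
  have hstep : ∀ b ∈ PySem.List.pyRange 0 (PySem.Int.floordiv n 9 + 1) 1, ∀ acc' : List String,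
      List.foldl (fun acc c => if 6 * a + 9 * b + 22 * c = n then acc ++ [pvFmt a b c] else acc)
          acc' (PySem.List.pyRange 0 (PySem.Int.floordiv n 22 + 1) 1)
        = (if (fun b => decide (0 ≤ n - 6 * a - 9 * b ∧ (n - 6 * a - 9 * b) % 22 = 0)) b = true then
             acc' ++ [pvFmt a b ((n - 6 * a - 9 * b) / 22)] else acc') := by
    intro b hb acc'
    exact pv_inner_eq n a b ha (PySem.List.mem_pyRange_one.mp hb).1 acc'
  have h1 :
      List.foldl (fun acc b =>
          List.foldl (fun acc c => if 6 * a + 9 * b + 22 * c = n then acc ++ [pvFmt a b c] else acc)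
            acc (PySem.List.pyRange 0 (PySem.Int.floordiv n 22 + 1) 1))
        acc (PySem.List.pyRange 0 (PySem.Int.floordiv n 9 + 1) 1)
      = List.foldl (fun acc' b =>
          if (fun b => decide (0 ≤ n - 6 * a - 9 * b ∧ (n - 6 * a - 9 * b) % 22 = 0)) b = true then
            acc' ++ [pvFmt a b ((n - 6 * a - 9 * b) / 22)] else acc')
        acc (PySem.List.pyRange 0 (PySem.Int.floordiv n 9 + 1) 1) :=
    PySem.List.foldl_congr_mem' (init := acc) (h := hstep)
  rw [h1,
      PySem.List.foldl_append_if
        (fun b => decide (0 ≤ n - 6 * a - 9 * b ∧ (n - 6 * a - 9 * b) % 22 = 0))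
        (fun b => pvFmt a b ((n - 6 * a - 9 * b) / 22)),
      pv_filter_b_eq n a ha han,
      pv_filterMap_if (fun b => PySem.Int.mod (n - 6 * a - 9 * b) 22 = 0)
        (fun b => pvFmt a b (PySem.Int.floordiv (n - 6 * a - 9 * b) 22))]
  have hmod : ∀ x : Int, PySem.Int.mod x 22 = x % 22 := fun x =>
    PySem.Int.mod_eq_emod_of_pos (by norm_num)
  have hdiv : ∀ x : Int, PySem.Int.floordiv x 22 = x / 22 := fun x =>
    PySem.Int.floordiv_eq_ediv_of_pos (by norm_num)
  simp only [hmod, hdiv]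

-- ===== VERDICT (by name: the statement is the Claim_ definition above) =====
theorem find_nuggets_combination_spec : Claim_equal_find_nuggets_combination := by
  intro n _
  unfold Spec_find_nuggets_combination find_nuggets_combination find_nuggets_combination_alt
  have h6 : PySem.Int.floordiv n 6 = n / 6 := PySem.Int.floordiv_eq_ediv_of_pos (by norm_num)
  have hrow : ∀ a ∈ PySem.List.pyRange 0 (PySem.Int.floordiv n 6 + 1) 1, ∀ acc : List String,
      List.foldl (fun acc b =>
          List.foldl (fun acc c => if 6 * a + 9 * b + 22 * c = n then acc ++ [pvFmt a b c] else acc)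
            acc (PySem.List.pyRange 0 (PySem.Int.floordiv n 22 + 1) 1))
        acc (PySem.List.pyRange 0 (PySem.Int.floordiv n 9 + 1) 1)
        = acc ++ (PySem.List.pyRange 0 (PySem.Int.floordiv (n - 6 * a) 9 + 1) 1).filterMap (fun b =>
            if PySem.Int.mod (n - 6 * a - 9 * b) 22 = 0 then
              some (pvFmt a b (PySem.Int.floordiv (n - 6 * a - 9 * b) 22))
            else none) := by
    intro a ha acc
    have hm := PySem.List.mem_pyRange_one.mp ha
    have hdm : 6 * (n / 6) + n % 6 = n := Int.ediv_add_emod n 6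
    have hm0 : 0 ≤ n % 6 := Int.emod_nonneg n (by norm_num)
    have hm6 : n % 6 < 6 := Int.emod_lt_of_pos n (by norm_num)
    refine pv_row_eq n a hm.1 ?_ acc
    have : a < n / 6 + 1 := by rw [← h6]; exact hm.2
    omega
  have h1 :
      List.foldl (fun acc a =>
          List.foldl (fun acc b =>
              List.foldl (fun acc c => if 6 * a + 9 * b + 22 * c = n then acc ++ [pvFmt a b c] else acc)
                acc (PySem.List.pyRange 0 (PySem.Int.floordiv n 22 + 1) 1))
            acc (PySem.List.pyRange 0 (PySem.Int.floordiv n 9 + 1) 1))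
        [] (PySem.List.pyRange 0 (PySem.Int.floordiv n 6 + 1) 1)
      = List.foldl (fun acc a =>
          acc ++ (PySem.List.pyRange 0 (PySem.Int.floordiv (n - 6 * a) 9 + 1) 1).filterMap (fun b =>
            if PySem.Int.mod (n - 6 * a - 9 * b) 22 = 0 then
              some (pvFmt a b (PySem.Int.floordiv (n - 6 * a - 9 * b) 22))
            else none))
        [] (PySem.List.pyRange 0 (PySem.Int.floordiv n 6 + 1) 1) :=
    PySem.List.foldl_congr_mem' (init := []) (h := hrow)
  rw [h1, PySem.List.foldl_append_eq_flatMap]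
  simp
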